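-- pv_equiv track=rewrite | github.com/MiguelF42/Python-PartielS2 | reseau.py | binarymask
-- ===== SOURCE A (Python) =====
-- def binarymask(subnet_mask): # Convertit le masque de sous-réseau en binaire
--     c = subnet_mask
--     mask = []
--     for i in range(32) :
--         if c > 0:
--             mask.append(1)
--             c -= 1
--         else:
--             mask.append(0)
--     return mask
-- ===== SOURCE B (Python) =====
-- def binarymask(subnet_mask):  # closed form: k ones then (32-k) zeros
--     k = min(max(subnet_mask, 0), 32)
--     return [1] * k + [0] * (32 - k)
-- ===== Notes on version B (the rewrite author's own statement) =====
-- stated objective: simpler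
-- what changed: Replaces the 32-iteration decrement loop with a clamped count k = min(max(mask,0),32) and direct list construction [1]*k + [0]*(32-k).
import Mathlib
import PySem

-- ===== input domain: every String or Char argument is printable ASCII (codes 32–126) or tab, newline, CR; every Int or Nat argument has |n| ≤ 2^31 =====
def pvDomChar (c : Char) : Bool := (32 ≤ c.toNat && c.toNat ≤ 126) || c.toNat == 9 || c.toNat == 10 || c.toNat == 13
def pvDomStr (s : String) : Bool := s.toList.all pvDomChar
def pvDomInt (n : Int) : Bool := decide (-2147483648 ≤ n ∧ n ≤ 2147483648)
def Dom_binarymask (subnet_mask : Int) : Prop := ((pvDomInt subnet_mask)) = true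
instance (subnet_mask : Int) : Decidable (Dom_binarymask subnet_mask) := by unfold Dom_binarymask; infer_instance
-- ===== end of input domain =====

-- ===== PORT A =====
-- Loop state: (c, mask); for i in range(32): if c>0 append 1, c-=1 else append 0.
def binarymask (subnet_mask : Int) : List Int :=
  (((PySem.List.pyRange 0 32 1).foldl
      (fun (st : Int × List Int) _ =>
        if st.1 > 0 then (st.1 - 1, st.2 ++ [1]) else (st.1, st.2 ++ [0]))
      (subnet_mask, []))).2

-- ===== PORT B =====
-- Closed form: k = min(max(subnet_mask,0),32) ones followed by (32-k) zeros (simpler, no loop).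
def binarymask_alt (subnet_mask : Int) : List Int :=
  let k : Int := min (max subnet_mask 0) 32
  List.replicate k.toNat 1 ++ List.replicate (32 - k).toNat 0

-- ===== PRECONDITION & SPEC =====
def Spec_binarymask (subnet_mask : Int) (out : List Int) : Prop := out = binarymask_alt subnet_mask
instance (subnet_mask : Int) (out : List Int) : Decidable (Spec_binarymask subnet_mask out) := by unfold Spec_binarymask; infer_instance

-- ===== CLAIM (what is proved, stated in full; the proofs are below) =====
def Claim_equal_binarymask : Prop := ∀ (subnet_mask : Int), Dom_binarymask subnet_mask → Spec_binarymask subnet_mask (binarymask subnet_mask)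

-- ===== LEMMAS AND PROOFS =====

-- ===== VERDICT (by name: the statement is the Claim_ definition above) =====
lemma loop_spec (l : List Int) (c : Int) (acc : List Int) :
    ((l.foldl
        (fun (st : Int × List Int) _ =>
          if st.1 > 0 then (st.1 - 1, st.2 ++ [1]) else (st.1, st.2 ++ [0]))
        (c, acc))).2
      = acc ++ List.replicate (min (max c 0) (l.length : Int)).toNat 1
            ++ List.replicate (l.length - (min (max c 0) (l.length : Int)).toNat) 0 := by
  induction l generalizing c acc with
  | nil => simp
  | cons a l ih =>
    simp only [List.foldl_cons, List.length_cons]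
    by_cases h : c > 0
    · rw [if_pos h, ih]
      have hk : (min (max c 0) ((l.length : Int) + 1)).toNat
          = (min (max (c - 1) 0) (l.length : Int)).toNat + 1 := by omega
      push_cast
      rw [hk]
      simp [List.replicate_succ, Nat.add_sub_add_right]
    · rw [if_neg h, ih]
      have hk : (min (max c 0) ((l.length : Int) + 1)).toNat = 0 := by omega
      have hk2 : (min (max c 0) ((l.length : Int) : Int)).toNat = 0 := by omega
      push_cast
      rw [hk, hk2]
      simp [List.replicate_succ]

theorem binarymask_spec : Claim_equal_binarymask := by
  intro m _
  unfold Spec_binarymask binarymask binarymask_alt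
  have hr : (PySem.List.pyRange 0 32 1).length = 32 := by decide
  rw [loop_spec, hr]
  simp
  omega
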